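-- pv_equiv track=rewrite | github.com/HCID274/MC_Servant | backend/bot/actions.py | _infer_tool_requirements
-- ===== SOURCE A (Python) =====
-- from typing import Optional, List, Dict, Any, Callable
--
-- def _infer_tool_requirements(required_tools: List[str]) -> tuple[Optional[str], Optional[str]]:
--     """Infer tool type and minimum tier from required tool names."""
--     tier_order = ["wooden", "stone", "iron", "diamond", "netherite"]
--     tool_type = None
--     min_tier = None
--
--     for tool in required_tools or []:
--         if not isinstance(tool, str):
--             continue
--         name = tool.lower()
--         parts = name.split("_")
--         if len(parts) < 2:
--             continue
--         tier = parts[0]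
--         kind = parts[-1]
--
--         if tool_type is None:
--             tool_type = kind
--         if tier in tier_order:
--             if min_tier is None or tier_order.index(tier) < tier_order.index(min_tier):
--                 min_tier = tier
--
--     if tool_type and min_tier is None:
--         min_tier = "wooden"
--
--     return tool_type, min_tier
-- ===== SOURCE B (Python) =====
-- def _infer_tool_requirements(required_tools):
--     """Infer tool type and minimum tier from required tool names."""
--     tier_order = ["wooden", "stone", "iron", "diamond", "netherite"]
--
--     parsed = []
--     for tool in required_tools or []:
--         if isinstance(tool, str):
--             parts = tool.lower().split("_")
--             if len(parts) >= 2: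
--                 parsed.append((parts[0], parts[-1]))
--
--     tool_type = parsed[0][1] if parsed else None
--     valid = [tier for tier, _ in parsed if tier in tier_order]
--     min_tier = min(valid, key=tier_order.index) if valid else None
--     if tool_type and min_tier is None:
--         min_tier = "wooden"
--     return tool_type, min_tier
-- ===== Notes on version B (the rewrite author's own statement) =====
-- stated objective: simpler
-- what changed: Replaces the single stateful loop carrying two Option accumulators with a build-then-reduce pipeline: parse all names into (tier, kind) pairs once, read tool_type off the first pair, and compute min_tier as a library min over the valid tiers keyed by tier_order.index.
import Mathlib
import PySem

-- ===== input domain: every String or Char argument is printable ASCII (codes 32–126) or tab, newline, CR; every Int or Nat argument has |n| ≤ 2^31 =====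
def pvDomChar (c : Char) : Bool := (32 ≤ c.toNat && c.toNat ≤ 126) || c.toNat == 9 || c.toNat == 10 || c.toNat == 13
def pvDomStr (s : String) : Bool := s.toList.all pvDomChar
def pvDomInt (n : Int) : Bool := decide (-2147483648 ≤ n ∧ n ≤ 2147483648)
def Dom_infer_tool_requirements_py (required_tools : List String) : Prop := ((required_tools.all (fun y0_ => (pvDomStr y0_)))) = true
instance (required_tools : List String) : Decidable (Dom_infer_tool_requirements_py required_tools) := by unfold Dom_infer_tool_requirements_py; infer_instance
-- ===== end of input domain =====

-- B replaces A's stateful two-accumulator loop by a build-then-reduce pipeline (parse all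
-- pairs once, head for the type, library min-by-key for the tier); objective: simpler.

-- tier_order, shared by both ports (each Python defines the same literal list locally)
def pyTierOrder : List String := ["wooden", "stone", "iron", "diamond", "netherite"]

-- Python truthiness of an Optional[str]: non-None and non-empty ('if tool_type')
def pyStrOptTruthy : Option String → Bool
  | none => false
  | some s => !(s == "")

-- ===== PORT A =====
-- the for-loop of A over (toolType, minTier); isinstance(tool, str) is always true
-- under the List String typing, so that 'continue' branch is vacuous here.
-- sep "_" ≠ "", so split? is always 'some' and '.getD []' is exact;
-- parts is nonempty (split never returns []), so parts[0] / parts[-1] are headD / getLastD.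
def inferALoop : List String → Option String × Option String → Option String × Option String
  | [], st => st
  | tool :: rest, (toolType, minTier) =>
      let name := PySem.Str.lower tool
      let parts := (PySem.Str.split? name "_").getD []
      if parts.length < 2 then inferALoop rest (toolType, minTier)
      else
        let tier := parts.headD ""
        let kind := parts.getLastD ""
        let toolType' := match toolType with
          | none => some kind
          | some k => some k
        let minTier' :=
          if tier ∈ pyTierOrder then
            match minTier with
            | none => some tier
            | some m =>
                if pyTierOrder.idxOf tier < pyTierOrder.idxOf m then some tier else some m
          else minTier
        inferALoop rest (toolType', minTier')

def infer_tool_requirements_py (required_tools : List String) : Option String × Option String :=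
  let st := inferALoop required_tools (none, none)
  let minTier := if pyStrOptTruthy st.1 && st.2 == none then some "wooden" else st.2
  (st.1, minTier)

-- ===== PORT B =====
-- parse one name into its (tier, kind) pair if it has ≥ 2 underscore parts
def inferBParse (tool : String) : Option (String × String) :=
  let parts := (PySem.Str.split? (PySem.Str.lower tool) "_").getD []
  if 2 ≤ parts.length then some (parts.headD "", parts.getLastD "") else none

def infer_tool_requirements_py_alt (required_tools : List String) : Option String × Option String :=
  let parsed := required_tools.filterMap inferBParse
  let toolType := parsed.head?.map Prod.snd
  let valid := (parsed.map Prod.fst).filter (fun t => decide (t ∈ pyTierOrder))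
  -- min(valid, key=tier_order.index) if valid else None
  let minTier := PySem.List.min? valid (fun t => pyTierOrder.idxOf t)
  let minTier := if pyStrOptTruthy toolType && minTier == none then some "wooden" else minTier
  (toolType, minTier)

-- ===== PRECONDITION & SPEC =====
def Spec_infer_tool_requirements_py (required_tools : List String) (out : Option String × Option String) : Prop := out = infer_tool_requirements_py_alt required_tools
instance (required_tools : List String) (out : Option String × Option String) : Decidable (Spec_infer_tool_requirements_py required_tools out) := by unfold Spec_infer_tool_requirements_py; infer_instance

-- ===== CLAIM (what is proved, stated in full; the proofs are below) =====
def Claim_equal_infer_tool_requirements_py : Prop := ∀ (required_tools : List String), Dom_infer_tool_requirements_py required_tools → Spec_infer_tool_requirements_py required_tools (infer_tool_requirements_py required_tools)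

-- ===== LEMMAS AND PROOFS =====

-- A's min_tier update, as a fold step (identical to the fold inside PySem.List.min?
-- with key pyTierOrder.idxOf)
def minStep (acc : Option String) (tier : String) : Option String :=
  match acc with
  | none => some tier
  | some m => if pyTierOrder.idxOf tier < pyTierOrder.idxOf m then some tier else some m

-- A's loop, from any state, is B's build-then-reduce pipeline
lemma inferALoop_eq (ts : List String) : ∀ (tt mt : Option String),
    inferALoop ts (tt, mt) =
      (tt.or ((ts.filterMap inferBParse).head?.map Prod.snd),
       ((((ts.filterMap inferBParse).map Prod.fst).filter
          (fun t => decide (t ∈ pyTierOrder))).foldl minStep mt)) := by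
  induction ts with
  | nil => intro tt mt; simp [inferALoop]
  | cons tool rest ih =>
    intro tt mt
    rw [inferALoop]
    by_cases h : ((PySem.Str.split? (PySem.Str.lower tool) "_").getD []).length < 2
    · have hb : inferBParse tool = none := by
        simp only [inferBParse]; rw [if_neg (by omega)]
      rw [if_pos h, ih, List.filterMap_cons, hb]
    · have hb : inferBParse tool =
          some (((PySem.Str.split? (PySem.Str.lower tool) "_").getD []).headD "",
                ((PySem.Str.split? (PySem.Str.lower tool) "_").getD []).getLastD "") := by
        simp only [inferBParse]; rw [if_pos (by omega)]
      rw [if_neg h, ih, List.filterMap_cons, hb]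
      simp only [List.head?_cons, List.map_cons, Option.map_some, List.filter_cons,
        Prod.mk.injEq]
      refine ⟨?_, ?_⟩
      · cases tt <;> rfl
      · by_cases ht : (((PySem.Str.split? (PySem.Str.lower tool) "_").getD []).headD "")
            ∈ pyTierOrder
        · rw [if_pos ht, if_pos (by simpa using ht), List.foldl_cons]
          cases mt <;> rfl
        · rw [if_neg ht, if_neg (by simpa using ht)]

-- B's library min-by-key is exactly the running strict-minimum fold
lemma min?_eq_foldl_minStep (xs : List String) :
    PySem.List.min? xs (fun t => pyTierOrder.idxOf t) = xs.foldl minStep none := by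
  simp only [PySem.List.min?]
  congr 1
  funext acc x
  cases acc <;> rfl

-- ===== VERDICT (by name: the statement is the Claim_ definition above) =====
theorem infer_tool_requirements_py_spec : Claim_equal_infer_tool_requirements_py := by
  intro required_tools _hDom
  show infer_tool_requirements_py required_tools = infer_tool_requirements_py_alt required_tools
  simp only [infer_tool_requirements_py, infer_tool_requirements_py_alt, inferALoop_eq,
    Option.none_or, min?_eq_foldl_minStep]
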